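-- pv_equiv track=rewrite | github.com/d-schneid/master-thesis | data_preprocessing/tasks/code_completion.py | truncate_ast_dfg_code_idxs_mapping
-- ===== SOURCE A (Python) =====
-- def truncate_ast_dfg_code_idxs_mapping(truncate_idx, ast_dfg_code_idxs_mapping):
-- 	truncated_mapping = []
-- 	for idx, sublist in enumerate(ast_dfg_code_idxs_mapping):
-- 		filtered = [x for x in sublist if x <= truncate_idx]
-- 		if not filtered:
-- 			return truncated_mapping, idx
-- 		truncated_mapping.append(filtered)
--
-- 	return truncated_mapping, len(ast_dfg_code_idxs_mapping)
-- ===== SOURCE B (Python) =====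
-- from itertools import takewhile
--
-- def truncate_ast_dfg_code_idxs_mapping(truncate_idx, ast_dfg_code_idxs_mapping):
--     filtered_all = [[x for x in s if x <= truncate_idx] for s in ast_dfg_code_idxs_mapping]
--     truncated_mapping = list(takewhile(lambda f: f, filtered_all))
--     return truncated_mapping, len(truncated_mapping)
-- ===== Notes on version B (the rewrite author's own statement) =====
-- stated objective: idiomatic
-- what changed: Replaced the single accumulating loop with early return by a two-phase pass: precompute all filtered sublists with one comprehension, then take the leading run of non-empty ones with itertools.takewhile and return it with its length.
import Mathlib
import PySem

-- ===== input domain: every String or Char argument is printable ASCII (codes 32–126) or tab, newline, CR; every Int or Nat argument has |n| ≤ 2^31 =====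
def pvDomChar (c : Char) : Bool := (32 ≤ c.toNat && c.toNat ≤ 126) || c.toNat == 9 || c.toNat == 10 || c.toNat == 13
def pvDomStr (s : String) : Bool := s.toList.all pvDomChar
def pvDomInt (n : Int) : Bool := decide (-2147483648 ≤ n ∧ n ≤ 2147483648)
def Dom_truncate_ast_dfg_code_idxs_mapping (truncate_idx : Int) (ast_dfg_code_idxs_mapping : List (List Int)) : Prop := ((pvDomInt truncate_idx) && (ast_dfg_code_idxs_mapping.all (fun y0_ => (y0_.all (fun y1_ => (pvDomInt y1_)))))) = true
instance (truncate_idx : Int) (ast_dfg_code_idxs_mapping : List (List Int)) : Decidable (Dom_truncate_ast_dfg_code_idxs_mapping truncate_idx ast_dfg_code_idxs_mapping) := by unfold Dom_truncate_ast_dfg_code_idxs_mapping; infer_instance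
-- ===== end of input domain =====

-- ===== PORT A =====
-- A: accumulating loop over enumerate with early return (idx, acc) when a filtered
-- sublist is empty; transliterated as structural recursion carrying the same state.
def pvA_loop (truncate_idx : Int) : List (List Int) → List (List Int) × Int
  | [] => ([], 0)
  | sublist :: rest =>
    let filtered := sublist.filter (fun x => decide (x ≤ truncate_idx))
    if filtered = [] then ([], 0)
    else
      let r := pvA_loop truncate_idx rest
      (filtered :: r.1, r.2 + 1)

def truncate_ast_dfg_code_idxs_mapping (truncate_idx : Int) (ast_dfg_code_idxs_mapping : List (List Int)) : List (List Int) × Int :=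
  pvA_loop truncate_idx ast_dfg_code_idxs_mapping

-- ===== PORT B =====
-- B: build all filtered sublists first, then take the leading run of non-empty ones.
def truncate_ast_dfg_code_idxs_mapping_alt (truncate_idx : Int) (ast_dfg_code_idxs_mapping : List (List Int)) : List (List Int) × Int :=
  let filtered_all := ast_dfg_code_idxs_mapping.map (fun s => s.filter (fun x => decide (x ≤ truncate_idx)))
  let truncated_mapping := filtered_all.takeWhile (fun f => !f.isEmpty)
  (truncated_mapping, (truncated_mapping.length : Int))

-- ===== PRECONDITION & SPEC =====
def Spec_truncate_ast_dfg_code_idxs_mapping (truncate_idx : Int) (ast_dfg_code_idxs_mapping : List (List Int)) (out : List (List Int) × Int) : Prop := out = truncate_ast_dfg_code_idxs_mapping_alt truncate_idx ast_dfg_code_idxs_mapping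
instance (truncate_idx : Int) (ast_dfg_code_idxs_mapping : List (List Int)) (out : List (List Int) × Int) : Decidable (Spec_truncate_ast_dfg_code_idxs_mapping truncate_idx ast_dfg_code_idxs_mapping out) := by unfold Spec_truncate_ast_dfg_code_idxs_mapping; infer_instance

-- ===== CLAIM (what is proved, stated in full; the proofs are below) =====
def Claim_equal_truncate_ast_dfg_code_idxs_mapping : Prop := ∀ (truncate_idx : Int) (ast_dfg_code_idxs_mapping : List (List Int)), Dom_truncate_ast_dfg_code_idxs_mapping truncate_idx ast_dfg_code_idxs_mapping → Spec_truncate_ast_dfg_code_idxs_mapping truncate_idx ast_dfg_code_idxs_mapping (truncate_ast_dfg_code_idxs_mapping truncate_idx ast_dfg_code_idxs_mapping)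

-- ===== LEMMAS AND PROOFS =====

-- ===== VERDICT (by name: the statement is the Claim_ definition above) =====
lemma pvAB_agree (t : Int) (l : List (List Int)) :
    pvA_loop t l = truncate_ast_dfg_code_idxs_mapping_alt t l := by
  induction l with
  | nil => rfl
  | cons s rest ih =>
    simp only [pvA_loop, truncate_ast_dfg_code_idxs_mapping_alt, List.map_cons,
      List.takeWhile_cons] at *
    by_cases h : s.filter (fun x => decide (x ≤ t)) = []
    · simp [h]
    · simp [h, ih]

-- ===== VERDICT (by name: the statement is the Claim_ definition above) =====
theorem truncate_ast_dfg_code_idxs_mapping_spec : Claim_equal_truncate_ast_dfg_code_idxs_mapping := by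
  intro t l _
  unfold Spec_truncate_ast_dfg_code_idxs_mapping truncate_ast_dfg_code_idxs_mapping
  exact pvAB_agree t l
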